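-- pv_equiv track=rewrite | github.com/Hollando78/uht-factory | scripts/generate_meta_classes.py | get_active_traits_from_hex
-- ===== SOURCE A (Python) =====
-- from typing import Dict, List, Any
--
-- def get_traits_for_layer(traits: List[Dict], layer: str) -> List[Dict]:
--     """Get traits for a specific layer."""
--     return [t for t in traits if t["layer"] == layer]
--
-- def hex_to_binary(hex_val: str) -> str:
--     """Convert hex string to 8-bit binary."""
--     return bin(int(hex_val, 16))[2:].zfill(8)
--
-- def get_active_traits_from_hex(hex_val: str, layer: str, traits: List[Dict]) -> List[Dict]:
--     """Decode which traits are active based on hex value and layer."""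
--     binary = hex_to_binary(hex_val)
--     layer_traits = get_traits_for_layer(traits, layer)
--
--     active = []
--     for i, bit in enumerate(binary):
--         if bit == "1":
--             # Bit index maps to trait within layer (0-7 -> first 8 traits of layer)
--             trait = layer_traits[i] if i < len(layer_traits) else None
--             if trait:
--                 active.append(trait)
--
--     return active
-- ===== SOURCE B (Python) =====
-- from typing import Dict, List, Any
--
-- def get_traits_for_layer(traits: List[Dict], layer: str) -> List[Dict]:
--     """Get traits for a specific layer."""
--     return [t for t in traits if t["layer"] == layer]
--
-- def hex_to_binary(hex_val: str) -> str:
--     """Convert hex string to 8-bit binary."""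
--     return bin(int(hex_val, 16))[2:].zfill(8)
--
-- def get_active_traits_from_hex(hex_val: str, layer: str, traits: List[Dict]) -> List[Dict]:
--     """Decode which traits are active based on hex value and layer."""
--     binary = hex_to_binary(hex_val)
--     # One fused pass over the raw trait list: no intermediate per-layer list is
--     # built; a counter j tracks this trait's position within its layer, and the
--     # trait is kept exactly when the j-th character of the bitmask is '1'.
--     active = []
--     j = 0
--     for t in traits:
--         if t["layer"] == layer:
--             if j < len(binary) and binary[j] == "1":
--                 active.append(t)
--             j += 1
--     return active
-- ===== Notes on version B (the rewrite author's own statement) =====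
-- stated objective: simpler
-- what changed: A stages two passes (filter traits into layer_traits, then enumerate the binary string and index into that list with a bounds check, None sentinel and truthiness test); B fuses them into one pass over the raw trait list with a within-layer counter j, keeping a trait exactly when binary[j] == '1', building no intermediate list and using no indexing into a staged list.
import Mathlib
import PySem

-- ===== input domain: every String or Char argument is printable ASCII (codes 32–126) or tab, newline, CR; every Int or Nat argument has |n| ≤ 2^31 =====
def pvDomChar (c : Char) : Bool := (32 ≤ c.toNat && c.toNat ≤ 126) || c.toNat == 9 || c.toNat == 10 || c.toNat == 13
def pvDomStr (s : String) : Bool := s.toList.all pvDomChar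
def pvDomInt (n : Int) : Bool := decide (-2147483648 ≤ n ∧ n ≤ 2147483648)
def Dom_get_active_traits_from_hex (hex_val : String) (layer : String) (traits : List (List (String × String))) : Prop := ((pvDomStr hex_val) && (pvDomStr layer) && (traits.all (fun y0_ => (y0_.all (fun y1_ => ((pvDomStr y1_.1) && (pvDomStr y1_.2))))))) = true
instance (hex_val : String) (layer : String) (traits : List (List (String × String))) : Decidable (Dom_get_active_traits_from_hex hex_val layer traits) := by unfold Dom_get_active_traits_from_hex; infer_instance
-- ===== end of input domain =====

-- B fuses A's two passes (filter into layer_traits, then indexed bit loop with a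
-- bounds check, None sentinel and truthiness test) into one pass over the raw
-- trait list with a within-layer counter (simpler: no intermediate list, no indexing).

-- ===== PORT A =====
-- module helper: get_traits_for_layer(traits, layer)
def pvTraitsForLayer (traits : List (List (String × String))) (layer : String) : List (List (String × String)) :=
  traits.filter (fun t =>
    match (PySem.Dict.mk t).get? "layer" with
    | some v => v == layer
    | none => false)   -- Python raises KeyError here; such inputs are excluded by Pre_

-- module helper: hex_to_binary(hex_val) = bin(int(hex_val, 16))[2:].zfill(8)
def pvHexToBinary (hex_val : String) : List Char :=
  match PySem.Int.ofStrBase? hex_val 16 with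
  | none => []       -- int(hex_val, 16) raises ValueError here; excluded by Pre_
  | some n => PySem.Chars.zfill ((PySem.Int.toBinChars0b n).drop 2) 8

-- A's 'for i, bit in enumerate(binary)' loop, state (i, active)
def pvLoopA (bs : List Char) (lt : List (List (String × String))) (i : Nat)
    (active : List (List (String × String))) : List (List (String × String)) :=
  match bs with
  | [] => active
  | bit :: rest =>
      pvLoopA rest lt (i + 1)
        (if bit = '1' then
          match (if i < lt.length then lt[i]? else none) with
          | some t => if t.isEmpty then active else active ++ [t]  -- 'if trait:' — empty dict is falsy
          | none => active
        else active)

def get_active_traits_from_hex (hex_val : String) (layer : String) (traits : List (List (String × String))) : List (List (String × String)) :=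
  pvLoopA (pvHexToBinary hex_val) (pvTraitsForLayer traits layer) 0 []

-- ===== PORT B =====
-- B's fused 'for t in traits' loop, state (j, active); 'j < len(binary) and binary[j] == "1"'
-- is exactly 'bs[j]? = some '1'' (bs[j]? is none iff j is out of range).
def pvLoopB (layer : String) (bs : List Char) (traits : List (List (String × String))) (j : Nat)
    (active : List (List (String × String))) : List (List (String × String)) :=
  match traits with
  | [] => active
  | t :: rest =>
      match (PySem.Dict.mk t).get? "layer" with
      | some v =>
          if v == layer then
            pvLoopB layer bs rest (j + 1)
              (match bs[j]? with
               | some '1' => active ++ [t]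
               | _ => active)
          else pvLoopB layer bs rest j active
      | none => pvLoopB layer bs rest j active  -- t["layer"] raises KeyError; excluded by Pre_

def get_active_traits_from_hex_alt (hex_val : String) (layer : String) (traits : List (List (String × String))) : List (List (String × String)) :=
  pvLoopB layer (pvHexToBinary hex_val) traits 0 []

-- ===== PRECONDITION & SPEC =====
-- Pre_ excludes exactly the inputs on which A raises: hex_val not accepted by int(·, 16)
-- (ValueError) or some trait dict without a "layer" key (KeyError).
def Pre_get_active_traits_from_hex (hex_val : String) (layer : String) (traits : List (List (String × String))) : Prop :=
  (PySem.Int.ofStrBase? hex_val 16).isSome = true ∧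
  ∀ t ∈ traits, ((PySem.Dict.mk t).get? "layer").isSome = true
instance (hex_val : String) (layer : String) (traits : List (List (String × String))) : Decidable (Pre_get_active_traits_from_hex hex_val layer traits) := by unfold Pre_get_active_traits_from_hex; infer_instance

def pvWitness_get_active_traits_from_hex : String × String × (List (List (String × String))) :=
  ("1ff", "core", [[("layer", "core"), ("name", "a")], [("layer", "core"), ("name", "b")]])

def Spec_get_active_traits_from_hex (hex_val : String) (layer : String) (traits : List (List (String × String))) (out : List (List (String × String))) : Prop := out = get_active_traits_from_hex_alt hex_val layer traits
instance (hex_val : String) (layer : String) (traits : List (List (String × String))) (out : List (List (String × String))) : Decidable (Spec_get_active_traits_from_hex hex_val layer traits out) := by unfold Spec_get_active_traits_from_hex; infer_instance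

-- ===== CLAIM (what is proved, stated in full; the proofs are below) =====
def Claim_equal_get_active_traits_from_hex : Prop := ∀ (hex_val : String) (layer : String) (traits : List (List (String × String))), Dom_get_active_traits_from_hex hex_val layer traits → Pre_get_active_traits_from_hex hex_val layer traits → Spec_get_active_traits_from_hex hex_val layer traits (get_active_traits_from_hex hex_val layer traits)

-- ===== LEMMAS AND PROOFS =====

-- every dict kept by the layer filter has a "layer" key, hence is a nonempty association list
lemma mem_pvTraitsForLayer_ne_nil {traits : List (List (String × String))} {layer : String}
    {t : List (String × String)} (h : t ∈ pvTraitsForLayer traits layer) : t.isEmpty = false := by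
  have hp := List.of_mem_filter h
  cases t with
  | nil => simp [PySem.Dict.get?] at hp
  | cons a as => rfl

-- A's loop computes the '1'-selected prefix of layer_traits (zip-filter characterisation)
lemma pvLoopA_eq_zip_filter (bs : List Char) (lt : List (List (String × String)))
    (hlt : ∀ t ∈ lt, t.isEmpty = false) :
    ∀ (i : Nat) (acc : List (List (String × String))),
      pvLoopA bs lt i acc =
        acc ++ (((bs.zip (lt.drop i)).filter (fun p => p.1 == '1')).map Prod.snd) := by
  induction bs with
  | nil => intro i acc; simp [pvLoopA]
  | cons bit rest ih =>
      intro i acc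
      cases hdrop : lt.drop i with
      | nil =>
          have hlen : lt.length ≤ i := List.drop_eq_nil_iff.mp hdrop
          have hdrop' : lt.drop (i + 1) = [] := List.drop_eq_nil_iff.mpr (by omega)
          simp [pvLoopA, Nat.not_lt.mpr hlen, ih, hdrop']
      | cons t ts =>
          have hlen : i < lt.length := by
            by_contra hc
            simp [List.drop_eq_nil_iff.mpr (by omega : lt.length ≤ i)] at hdrop
          have hget : lt[i]? = some t := by
            rw [← List.head?_drop, hdrop]; rfl
          have hts : lt.drop (i + 1) = ts := by
            rw [← List.tail_drop, hdrop]; rfl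
          have htne : t.isEmpty = false := hlt t (List.mem_of_mem_drop (hdrop ▸ List.mem_cons_self))
          have hgete : lt[i]'hlen = t := by
            rw [List.getElem?_eq_getElem hlen] at hget; exact Option.some.inj hget
          have htne' : t ≠ [] := by simpa using htne
          by_cases hb : bit = '1'
          · simp [pvLoopA, hb, hlen, hgete, htne', ih, hts]
          · simp [pvLoopA, hb, ih, hts]

-- B's fused loop computes the same zip-filter over the layer-filtered traits
lemma pvLoopB_eq_zip_filter (layer : String) (bs : List Char) :
    ∀ (traits : List (List (String × String))) (j : Nat) (acc : List (List (String × String))),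
      pvLoopB layer bs traits j acc =
        acc ++ ((((bs.drop j).zip (pvTraitsForLayer traits layer)).filter
                  (fun p => p.1 == '1')).map Prod.snd) := by
  intro traits
  induction traits with
  | nil => intro j acc; simp [pvLoopB, pvTraitsForLayer]
  | cons t rest ih =>
      intro j acc
      cases hk : (PySem.Dict.mk t).get? "layer" with
      | none =>
          have hfl : pvTraitsForLayer (t :: rest) layer = pvTraitsForLayer rest layer := by
            simp [pvTraitsForLayer, hk]
          simp [pvLoopB, hk, ih, hfl]
      | some v =>
          by_cases hv : v == layer
          · have hfl : pvTraitsForLayer (t :: rest) layer = t :: pvTraitsForLayer rest layer := by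
              simp [pvTraitsForLayer, hk, hv]
            cases hdrop : bs.drop j with
            | nil =>
                have hlen : bs.length ≤ j := List.drop_eq_nil_iff.mp hdrop
                have hget : bs[j]? = none := List.getElem?_eq_none hlen
                have hdrop' : bs.drop (j + 1) = [] := List.drop_eq_nil_iff.mpr (by omega)
                simp [pvLoopB, hk, hv, hget, ih, hfl, hdrop']
            | cons c cs =>
                have hget : bs[j]? = some c := by
                  rw [← List.head?_drop, hdrop]; rfl
                have hcs : bs.drop (j + 1) = cs := by
                  rw [← List.tail_drop, hdrop]; rfl
                by_cases hc : c = '1'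
                · subst hc
                  simp [pvLoopB, hk, hv, hget, ih, hfl, hcs]
                · have hm : (match bs[j]? with
                           | some '1' => acc ++ [t]
                           | _ => acc) = acc := by
                    rw [hget]
                    split
                    · rename_i heq
                      exact absurd (Option.some.inj heq) hc
                    · rfl
                  simp only [pvLoopB, hk, hv, hm, ih, hfl, hdrop, hcs]
                  simp [hc]
          · have hfl : pvTraitsForLayer (t :: rest) layer = pvTraitsForLayer rest layer := by
              simp [pvTraitsForLayer, hk, hv]
            simp [pvLoopB, hk, hv, ih, hfl]

-- ===== VERDICT (by name: the statement is the Claim_ definition above) =====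
theorem get_active_traits_from_hex_spec : Claim_equal_get_active_traits_from_hex := by
  intro hex_val layer traits _ _
  show get_active_traits_from_hex hex_val layer traits = get_active_traits_from_hex_alt hex_val layer traits
  unfold get_active_traits_from_hex get_active_traits_from_hex_alt
  rw [pvLoopA_eq_zip_filter _ _ (fun t ht => mem_pvTraitsForLayer_ne_nil ht) 0,
      pvLoopB_eq_zip_filter]
  simp
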